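-- pv_equiv track=rewrite | github.com/chenfq95/skills | .agents/skills/synconf/scripts/common.py | slugify_path_component
-- ===== SOURCE A (Python) =====
-- MAX_PATH_COMPONENT_LENGTH = 200  # Max length for path components after slugify
--
-- class PathValidationError(Exception):
--     """Raised when a path fails validation checks."""
--
-- def validate_not_reserved_name(name: str) -> None:
--     """Validate that a filename is not a Windows reserved name.
--
--     Args:
--         name: Filename to check
--
--     Raises:
--         PathValidationError: If name is reserved
--     """
--     reserved = {
--         "CON", "PRN", "AUX", "NUL",
--         "COM1", "COM2", "COM3", "COM4", "COM5", "COM6", "COM7", "COM8", "COM9",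
--         "LPT1", "LPT2", "LPT3", "LPT4", "LPT5", "LPT6", "LPT7", "LPT8", "LPT9",
--     }
--     base_name = name.upper().split(".")[0]
--     if base_name in reserved:
--         raise PathValidationError(f"'{name}' is a reserved Windows filename")
--
-- def slugify_path_component(value: str, max_length: int = MAX_PATH_COMPONENT_LENGTH) -> str:
--     """Convert a user-facing label into a stable repo path component.
--
--     Args:
--         value: Input string to slugify
--         max_length: Maximum output length
--
--     Returns:
--         Slugified string safe for use in file paths
--     """
--     lowered = value.strip().lower()
--     chars = []
--     last_was_dash = False
--
--     for char in lowered: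
--         if char.isalnum():
--             chars.append(char)
--             last_was_dash = False
--             continue
--
--         if not last_was_dash:
--             chars.append("-")
--             last_was_dash = True
--
--     result = "".join(chars).strip("-") or "item"
--
--     # Truncate if too long
--     if len(result) > max_length:
--         result = result[:max_length].rstrip("-")
--
--     # Validate not a reserved name
--     try:
--         validate_not_reserved_name(result)
--     except PathValidationError:
--         result = f"_{result}"
--
--     return result
-- ===== SOURCE B (Python) =====
-- MAX_PATH_COMPONENT_LENGTH = 200
--
-- _RESERVED = {
--     "CON", "PRN", "AUX", "NUL",
--     "COM1", "COM2", "COM3", "COM4", "COM5", "COM6", "COM7", "COM8", "COM9",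
--     "LPT1", "LPT2", "LPT3", "LPT4", "LPT5", "LPT6", "LPT7", "LPT8", "LPT9",
-- }
--
-- def slugify_path_component(value: str, max_length: int = MAX_PATH_COMPONENT_LENGTH) -> str:
--     """Two-pointer run extraction: collect maximal alphanumeric runs and join
--     them with '-' (collapsing and trimming separators falls out for free),
--     instead of a char-by-char loop with a last_was_dash flag plus strip('-')."""
--     s = value.strip().lower()
--     parts = []
--     i, n = 0, len(s)
--     while i < n:
--         if s[i].isalnum():
--             j = i
--             while j < n and s[j].isalnum():
--                 j += 1
--             parts.append(s[i:j])
--             i = j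
--         else:
--             i += 1
--     result = "-".join(parts) or "item"
--     if len(result) > max_length:
--         result = result[:max_length].rstrip("-")
--     if result.upper().split(".")[0] in _RESERVED:
--         result = "_" + result
--     return result
-- ===== Notes on version B (the rewrite author's own statement) =====
-- stated objective: alternative
-- what changed: B replaces A's char-by-char loop with a last_was_dash flag plus strip('-') by a two-pointer scan that extracts maximal alphanumeric runs and joins them with '-', which collapses and trims separators by construction; the reserved-name check is a direct membership test instead of try/except.
import Mathlib
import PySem

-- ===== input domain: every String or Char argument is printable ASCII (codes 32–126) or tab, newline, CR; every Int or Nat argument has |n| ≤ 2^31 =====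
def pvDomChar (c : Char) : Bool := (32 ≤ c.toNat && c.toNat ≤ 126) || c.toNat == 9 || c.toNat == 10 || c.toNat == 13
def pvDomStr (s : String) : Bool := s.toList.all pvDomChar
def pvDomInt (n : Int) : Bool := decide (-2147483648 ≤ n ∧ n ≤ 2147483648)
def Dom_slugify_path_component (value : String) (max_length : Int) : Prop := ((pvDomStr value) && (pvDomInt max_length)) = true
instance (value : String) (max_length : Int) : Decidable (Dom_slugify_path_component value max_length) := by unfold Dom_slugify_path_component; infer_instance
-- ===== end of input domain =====

-- B replaces A's char-by-char loop (last_was_dash flag + strip('-')) by extracting maximal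
-- alphanumeric runs and joining them with '-'; objective: alternative decomposition, same cost.

-- the Windows reserved names, upper-case, as in validate_not_reserved_name
def pvReserved : List (List Char) :=
  ["CON", "PRN", "AUX", "NUL",
   "COM1", "COM2", "COM3", "COM4", "COM5", "COM6", "COM7", "COM8", "COM9",
   "LPT1", "LPT2", "LPT3", "LPT4", "LPT5", "LPT6", "LPT7", "LPT8", "LPT9"].map String.toList

-- result.upper().split(".")[0] in reserved  (split of a string is never empty, so [0] is headD)
def pvIsReserved (result : List Char) : Bool :=
  pvReserved.contains ((PySem.Chars.splitOn (PySem.Chars.upper result) ['.']).headD [])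

-- result[:max_length].rstrip("-") when len(result) > max_length, else result  (shared tail of both Pythons)
def pvTruncate (result : List Char) (max_length : Int) : List Char :=
  if (result.length : Int) > max_length then
    -- rstrip("-") by hand (exact: Python strips the given chars from the right end)
    ((PySem.List.slice result none (some max_length)).reverse.dropWhile (fun c => (['-'].contains c))).reverse
  else result

-- ===== PORT A =====
-- the for-loop of A, threading (chars, last_was_dash)
def slugLoop : List Char → List Char → Bool → List Char
  | [], chars, _ => chars
  | c :: rest, chars, lastDash =>
    if PySem.Chars.isalnum c then slugLoop rest (chars ++ [c]) false
    else if !lastDash then slugLoop rest (chars ++ ['-']) true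
    else slugLoop rest chars lastDash

def slugify_path_component (value : String) (max_length : Int) : String :=
  let lowered := PySem.Chars.lower (PySem.Chars.strip value.toList)
  let chars := slugLoop lowered [] false
  let stripped := PySem.Chars.stripChars chars ['-']
  let result := if stripped.isEmpty then "item".toList else stripped
  let result := pvTruncate result max_length
  let result := if pvIsReserved result then '_' :: result else result
  String.ofList result

-- ===== PORT B =====
-- B's while loop: scan for the next alphanumeric run (s[i:j]) and jump past it;
-- ported as run extraction with takeWhile/dropWhile over the same list (exact)
def altRuns : List Char → List (List Char)
  | [] => []
  | c :: cs =>
    if PySem.Chars.isalnum c then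
      ((c :: cs).takeWhile PySem.Chars.isalnum) :: altRuns ((c :: cs).dropWhile PySem.Chars.isalnum)
    else altRuns cs
  termination_by l => l.length
  decreasing_by
    · rename_i h
      simp only [List.dropWhile_cons, h, if_pos, List.length_cons]
      have := List.length_dropWhile_le PySem.Chars.isalnum cs
      omega
    · simp

def slugify_path_component_alt (value : String) (max_length : Int) : String :=
  let s := PySem.Chars.lower (PySem.Chars.strip value.toList)
  let joined := PySem.Chars.join ['-'] (altRuns s)
  let result := if joined.isEmpty then "item".toList else joined
  let result := pvTruncate result max_length
  let result := if pvIsReserved result then '_' :: result else result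
  String.ofList result

-- ===== PRECONDITION & SPEC =====
def Spec_slugify_path_component (value : String) (max_length : Int) (out : String) : Prop := out = slugify_path_component_alt value max_length
instance (value : String) (max_length : Int) (out : String) : Decidable (Spec_slugify_path_component value max_length out) := by unfold Spec_slugify_path_component; infer_instance

-- ===== CLAIM (what is proved, stated in full; the proofs are below) =====
def Claim_equal_slugify_path_component : Prop := ∀ (value : String) (max_length : Int), Dom_slugify_path_component value max_length → Spec_slugify_path_component value max_length (slugify_path_component value max_length)

-- ===== LEMMAS AND PROOFS =====

-- A's loop without the accumulator
def pvCore : List Char → Bool → List Char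
  | [], _ => []
  | c :: cs, flag =>
    if PySem.Chars.isalnum c then c :: pvCore cs false
    else if flag then pvCore cs true else '-' :: pvCore cs true

theorem slugLoop_eq_core (l : List Char) : ∀ chars flag, slugLoop l chars flag = chars ++ pvCore l flag := by
  induction l with
  | nil => intro chars flag; simp [slugLoop, pvCore]
  | cons c cs ih =>
    intro chars flag
    simp only [slugLoop, pvCore]
    by_cases h : PySem.Chars.isalnum c = true
    · simp [h, ih]
    · simp only [h, Bool.not_eq_true']
      cases flag <;> simp [ih]

-- trailing '-' emitted by A's loop: present iff l contains an alnum char and ends non-alnum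
def pvPost (l : List Char) : List Char :=
  if l.any PySem.Chars.isalnum &&
      (match l.getLast? with | some c => !PySem.Chars.isalnum c | none => false) then ['-'] else []

theorem core_alnum_prefix (run : List Char) (rest : List Char) (h : ∀ c ∈ run, PySem.Chars.isalnum c = true) :
    pvCore (run ++ rest) false = run ++ pvCore rest false := by
  induction run with
  | nil => simp
  | cons c cs ih =>
    have hc := h c (by simp)
    simp only [List.cons_append, pvCore, hc, if_pos]
    rw [ih (fun x hx => h x (by simp [hx]))]

theorem altRuns_eq_nil_iff (l : List Char) : altRuns l = [] ↔ ∀ c ∈ l, PySem.Chars.isalnum c = false := by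
  induction l with
  | nil => simp [altRuns]
  | cons c cs ih =>
    by_cases h : PySem.Chars.isalnum c = true
    · simp [altRuns, h]
    · simp only [Bool.not_eq_true] at h
      simp [altRuns, h, ih]

theorem dropWhile_head_false {p : Char → Bool} {l : List Char} {y : Char} {ys : List Char}
    (h : List.dropWhile p l = y :: ys) : p y = false := by
  induction l with
  | nil => simp at h
  | cons a as ih =>
    rw [List.dropWhile_cons] at h
    by_cases ha : p a = true
    · exact ih (by simpa [ha] using h)
    · simp only [Bool.not_eq_true] at ha
      simp [ha] at h
      rw [← h.1]; exact ha

theorem getLast?_of_ne_nil {l : List Char} (h : l ≠ []) : ∃ c, l.getLast? = some c ∧ c ∈ l := by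
  obtain ⟨c, hc⟩ := Option.ne_none_iff_exists'.mp (mt List.getLast?_eq_none_iff.mp h)
  exact ⟨c, hc, List.mem_of_getLast? hc⟩

-- every extracted run is a nonempty all-alnum block
theorem altRuns_prop (l : List Char) : ∀ g ∈ altRuns l, g ≠ [] ∧ ∀ c ∈ g, PySem.Chars.isalnum c = true := by
  induction l using altRuns.induct with
  | case1 => simp [altRuns]
  | case2 c cs h ih =>
    intro g hg
    rw [altRuns, if_pos h] at hg
    rcases List.mem_cons.mp hg with rfl | hg'
    · exact ⟨by simp [List.takeWhile_cons, h], fun x hx => List.mem_takeWhile_imp hx⟩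
    · exact ih g hg'
  | case3 c cs h ih =>
    intro g hg
    rw [altRuns, if_neg h] at hg
    exact ih g hg

-- the joined runs are nonempty and start/end with an alnum char (when there is a run)
theorem join_ends (gs : List (List Char)) (hgs : ∀ g ∈ gs, g ≠ [] ∧ ∀ c ∈ g, PySem.Chars.isalnum c = true)
    (hne : gs ≠ []) :
    ∃ j t, PySem.Chars.join ['-'] gs = j :: t ∧ PySem.Chars.isalnum j = true ∧
      ∃ e, (j :: t).getLast? = some e ∧ PySem.Chars.isalnum e = true := by
  induction gs with
  | nil => exact absurd rfl hne
  | cons a gs ih =>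
    obtain ⟨hane, haal⟩ := hgs a (by simp)
    obtain ⟨j, t, rfl⟩ : ∃ j t, a = j :: t := by
      cases a with | nil => exact absurd rfl hane | cons x xs => exact ⟨x, xs, rfl⟩
    cases gs with
    | nil =>
      refine ⟨j, t, by rw [PySem.Chars.join_singleton], haal j (by simp), ?_⟩
      obtain ⟨e, he, hem⟩ := getLast?_of_ne_nil (l := j :: t) (by simp)
      exact ⟨e, he, haal e hem⟩
    | cons b gs' =>
      obtain ⟨j', t', hjoin, _, e, he, hee⟩ := ih (fun g hg => hgs g (by simp [hg])) (by simp)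
      refine ⟨j, t ++ '-' :: j' :: t', ?_, haal j (by simp), ?_⟩
      · rw [PySem.Chars.join_cons_cons, hjoin]; simp
      · refine ⟨e, ?_, hee⟩
        have : (j :: (t ++ '-' :: j' :: t')) = (j :: t ++ ['-']) ++ (j' :: t') := by simp
        rw [this, List.getLast?_append_of_ne_nil _ (by simp), ← hjoin, hjoin]
        exact he

theorem core_true_spec (l : List Char) :
    pvCore l true = PySem.Chars.join ['-'] (altRuns l) ++ pvPost l := by
  induction l using altRuns.induct with
  | case1 => simp [pvCore, altRuns, pvPost]
  | case2 c cs h ih =>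
    -- head alnum: split off the maximal run
    have hdec : c :: cs = (c :: cs).takeWhile PySem.Chars.isalnum ++ (c :: cs).dropWhile PySem.Chars.isalnum :=
      (List.takeWhile_append_dropWhile).symm
    set run := (c :: cs).takeWhile PySem.Chars.isalnum with hrun
    set rest := (c :: cs).dropWhile PySem.Chars.isalnum with hrest
    have hrunal : ∀ x ∈ run, PySem.Chars.isalnum x = true := fun x hx => List.mem_takeWhile_imp hx
    have hrunne : run ≠ [] := by simp [hrun, List.takeWhile_cons, h]
    have hcoref : pvCore (c :: cs) true = pvCore (c :: cs) false := by
      simp [pvCore, h]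
    have hruns : altRuns (c :: cs) = run :: altRuns rest := by
      rw [altRuns, if_pos h]
    rw [hcoref]
    conv_lhs => rw [hdec]
    rw [core_alnum_prefix run rest hrunal, hruns]
    cases hrc : rest with
    | nil =>
      simp only [pvCore, altRuns, PySem.Chars.join_singleton, List.append_nil]
      -- pvPost (c :: cs) = []: the last char is the last char of run, alnum
      have hlast : ∃ e, (c :: cs).getLast? = some e ∧ PySem.Chars.isalnum e = true := by
        obtain ⟨e, he, hem⟩ := getLast?_of_ne_nil hrunne
        refine ⟨e, ?_, hrunal e hem⟩
        conv_lhs => rw [hdec, hrc, List.append_nil]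
        exact he
      obtain ⟨e, he, hee⟩ := hlast
      simp [pvPost, he, hee]
    | cons d ds =>
      have hd : PySem.Chars.isalnum d = false := dropWhile_head_false (hrc ▸ hrest.symm)
      have hcored : pvCore (d :: ds) false = '-' :: pvCore (d :: ds) true := by
        simp [pvCore, hd]
      rw [hrc] at ih
      rw [hcored, ih]
      -- relate pvPost (c :: cs) and pvPost (d :: ds), and the join
      have hanyl : (c :: cs).any PySem.Chars.isalnum = true := by simp [h]
      have hlastl : (c :: cs).getLast? = (d :: ds).getLast? := by
        conv_lhs => rw [hdec, hrc]
        exact List.getLast?_append_of_ne_nil _ (by simp)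
      cases hgr : altRuns (d :: ds) with
      | nil =>
        -- no alnum char after the run: everything to the right is junk, one trailing dash
        have hall : ∀ x ∈ (d :: ds), PySem.Chars.isalnum x = false := (altRuns_eq_nil_iff _).mp hgr
        have hpostd : pvPost (d :: ds) = [] := by
          have : (d :: ds).any PySem.Chars.isalnum = false := by
            rw [Bool.eq_false_iff]; intro hx
            obtain ⟨x, hxm, hxa⟩ := List.any_eq_true.mp hx
            rw [hall x hxm] at hxa; exact Bool.false_ne_true hxa
          simp [pvPost, this]
        have hpostl : pvPost (c :: cs) = ['-'] := by
          obtain ⟨e, he, hem⟩ := getLast?_of_ne_nil (l := d :: ds) (by simp)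
          rw [pvPost, hlastl, he]
          simp [hanyl, hall e hem]
        rw [hpostd, hpostl, PySem.Chars.join_singleton]
        simp
      | cons g gs =>
        -- at least one more run: the dash is the separator, the tail is unchanged
        have hanyd : (d :: ds).any PySem.Chars.isalnum = true := by
          rw [List.any_eq_true]
          by_contra hnone
          have hall : ∀ x ∈ (d :: ds), PySem.Chars.isalnum x = false := by
            intro x hx
            rw [Bool.eq_false_iff]; exact fun hxt => hnone ⟨x, hx, hxt⟩
          rw [(altRuns_eq_nil_iff _).mpr hall] at hgr
          exact List.cons_ne_nil g gs hgr.symm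
        have hpost : pvPost (c :: cs) = pvPost (d :: ds) := by
          rw [pvPost, pvPost, hlastl, hanyl, hanyd]
        rw [hpost]
        conv_rhs => rw [PySem.Chars.join_cons_cons]
        simp
  | case3 c cs h ih =>
    have : pvCore (c :: cs) true = pvCore cs true := by simp [pvCore, h]
    rw [this, ih, altRuns, if_neg h]
    -- pvPost (c :: cs) = pvPost cs: c is not alnum, and for the last element
    cases hcs : cs with
    | nil => simp [pvPost, h]
    | cons d ds =>
      have hlast : (c :: cs).getLast? = cs.getLast? := by
        rw [hcs]
        exact List.getLast?_append_of_ne_nil (l₁ := [c]) (by simp)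
      have hany : (c :: cs).any PySem.Chars.isalnum = cs.any PySem.Chars.isalnum := by
        simp [List.any_cons, Bool.not_eq_true] at h ⊢
        simp [h]
      rw [← hcs, pvPost, pvPost, hlast, hany]

-- stripping '-' from both ends removes exactly the optional leading/trailing dash
theorem strip_pre_post (J pre post : List Char)
    (hpre : pre = [] ∨ pre = ['-']) (hpost : post = [] ∨ post = ['-'])
    (hJ : J = [] → post = [])
    (hJne : ∀ (j : Char) (t : List Char), J = j :: t → PySem.Chars.isalnum j = true ∧
      ∃ e, (j :: t).getLast? = some e ∧ PySem.Chars.isalnum e = true) :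
    PySem.Chars.stripChars (pre ++ (J ++ post)) ['-'] = J := by
  cases J with
  | nil =>
    rw [hJ rfl]
    rcases hpre with rfl | rfl <;> decide
  | cons j t =>
    obtain ⟨hj, e, he, hee⟩ := hJne j t rfl
    have hjne : j ≠ '-' := fun hh => absurd (hh ▸ hj) (by decide)
    have hene : e ≠ '-' := fun hh => absurd (hh ▸ hee) (by decide)
    have step1 : List.dropWhile (fun c => (['-'].contains c)) (pre ++ ((j :: t) ++ post)) =
        (j :: t) ++ post := by
      rcases hpre with rfl | rfl <;> simp [List.dropWhile_cons, hjne]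
    have step3 : List.dropWhile (fun c => (['-'].contains c)) ((j :: t).reverse) = (j :: t).reverse := by
      cases hrev : (j :: t).reverse with
      | nil => exact absurd (List.reverse_eq_nil_iff.mp hrev) (by simp)
      | cons y ys =>
        have hhead : ((j :: t).reverse).head? = some e := by
          rw [List.head?_reverse]; exact he
        rw [hrev] at hhead
        have hy : y = e := by simpa using hhead
        subst hy
        simp [List.dropWhile_cons, hene]
    show (List.dropWhile _ (List.dropWhile _ (pre ++ ((j :: t) ++ post))).reverse).reverse = _
    rw [step1, List.reverse_append]
    rcases hpost with rfl | rfl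
    · simp only [List.reverse_nil, List.nil_append]
      rw [step3, List.reverse_reverse]
    · have h2 : ((['-'] : List Char)).reverse ++ (j :: t).reverse =
          '-' :: (j :: t).reverse := by simp
      have hc : (['-'].contains '-') = true := by decide
      rw [h2, List.dropWhile_cons, if_pos hc, step3, List.reverse_reverse]

theorem strip_aux (m : List Char) (pre : List Char) (hpre : pre = [] ∨ pre = ['-']) :
    PySem.Chars.stripChars (pre ++ (PySem.Chars.join ['-'] (altRuns m) ++ pvPost m)) ['-'] =
      PySem.Chars.join ['-'] (altRuns m) := by
  apply strip_pre_post _ _ _ hpre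
  · cases hb : (m.any PySem.Chars.isalnum &&
        (match m.getLast? with | some c => !PySem.Chars.isalnum c | none => false)) <;>
      simp [pvPost, hb]
  · intro hJnil
    have hnil : altRuns m = [] := by
      cases hgr : altRuns m with
      | nil => simp [pvCore, altRuns, PySem.Chars.stripChars, PySem.Chars.join, List.intercalate]
      | cons g gs =>
        obtain ⟨j, t, hj, -⟩ := join_ends (g :: gs) (fun g' hg' => altRuns_prop m g' (hgr ▸ hg')) (by simp)
        rw [hgr, hj] at hJnil
        exact absurd hJnil (by simp)
    have hall := (altRuns_eq_nil_iff m).mp hnil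
    have hany : m.any PySem.Chars.isalnum = false := by
      rw [Bool.eq_false_iff]; intro hx
      obtain ⟨x, hxm, hxa⟩ := List.any_eq_true.mp hx
      rw [hall x hxm] at hxa; exact Bool.false_ne_true hxa
    simp [pvPost, hany]
  · intro j t hjt
    have hne : altRuns m ≠ [] := by
      intro hnil
      rw [hnil] at hjt
      exact absurd hjt (by simp [PySem.Chars.join, List.intercalate])
    obtain ⟨j', t', hj, hal, e, he, hee⟩ := join_ends (altRuns m) (altRuns_prop m) hne
    rw [hjt] at hj
    obtain ⟨rfl, rfl⟩ : j' = j ∧ t' = t := by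
      constructor <;> [exact (List.cons.injEq .. ▸ hj).1.symm; exact (List.cons.injEq .. ▸ hj).2.symm]
    exact ⟨hal, e, he, hee⟩

theorem strip_core (l : List Char) :
    PySem.Chars.stripChars (pvCore l false) ['-'] = PySem.Chars.join ['-'] (altRuns l) := by
  cases l with
  | nil => simp [pvCore, altRuns, PySem.Chars.stripChars, PySem.Chars.join, List.intercalate]
  | cons c cs =>
    by_cases h : PySem.Chars.isalnum c = true
    · have : pvCore (c :: cs) false = pvCore (c :: cs) true := by simp [pvCore, h]
      rw [this, core_true_spec]
      have := strip_aux (c :: cs) [] (Or.inl rfl)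
      simpa using this
    · have h' : PySem.Chars.isalnum c = false := by simpa using h
      have : pvCore (c :: cs) false = '-' :: pvCore cs true := by simp [pvCore, h']
      rw [this, core_true_spec]
      have haltr : altRuns (c :: cs) = altRuns cs := by rw [altRuns, if_neg h]
      rw [haltr]
      exact strip_aux cs ['-'] (Or.inr rfl)

-- ===== VERDICT (by name: the statement is the Claim_ definition above) =====
theorem slugify_path_component_spec : Claim_equal_slugify_path_component := by
  intro value max_length _
  unfold Spec_slugify_path_component slugify_path_component slugify_path_component_alt
  simp only [slugLoop_eq_core, List.nil_append, strip_core]
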